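-- pv_equiv track=rewrite | github.com/milicaeva/Sparse-matrix | main.py | kenta
-- ===== SOURCE A (Python) =====
-- def izbrojSveKockice(kockice):
--     'Vraca listu sa brojem pojavljivanja svih strana kocke'
--     izbrojeno = []
--     for i in range(1, 7):
--         izbrojeno.append(kockice.count(i))
--     return izbrojeno
--
-- def kenta(kockice, bacanje):
--     'Proverava jel kenta, ako jeste vraca vrednost, ako nije vraca 0'
--     izbrojeno = izbrojSveKockice(kockice)
--     brojac = 0
--     for i in range(6):
--         if izbrojeno[i] == 1:
--             brojac += 1
--             if brojac == 5:
--                 return 76-10*bacanje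
--         else:
--             brojac = 0
--     return 0
-- ===== SOURCE B (Python) =====
-- def kenta(kockice, bacanje):
--     'Proverava jel kenta, ako jeste vraca vrednost, ako nije vraca 0'
--     singles = {f for f in range(1, 7) if kockice.count(f) == 1}
--     if {1, 2, 3, 4, 5} <= singles or {2, 3, 4, 5, 6} <= singles:
--         return 76 - 10 * bacanje
--     return 0
-- ===== Notes on version B (the rewrite author's own statement) =====
-- stated objective: simpler
-- what changed: Replaced the counts-array plus running consecutive-singleton counter scan with building the set of faces occurring exactly once and testing the only two possible straights (1-5, 2-6) by subset inclusion.
import Mathlib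
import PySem

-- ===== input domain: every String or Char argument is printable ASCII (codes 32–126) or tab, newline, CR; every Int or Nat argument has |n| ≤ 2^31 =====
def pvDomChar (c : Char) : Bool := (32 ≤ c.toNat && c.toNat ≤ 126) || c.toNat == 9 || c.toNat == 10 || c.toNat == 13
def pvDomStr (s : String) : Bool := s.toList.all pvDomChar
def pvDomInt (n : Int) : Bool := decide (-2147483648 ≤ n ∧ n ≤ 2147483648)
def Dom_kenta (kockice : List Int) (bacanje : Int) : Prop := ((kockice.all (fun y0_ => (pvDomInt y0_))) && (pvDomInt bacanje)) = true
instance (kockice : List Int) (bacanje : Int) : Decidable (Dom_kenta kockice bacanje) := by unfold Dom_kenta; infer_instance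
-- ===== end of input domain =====

-- B replaces A's running consecutive-singleton counter over a counts array by a set of
-- singleton faces and two subset tests (objective: simpler).

-- ===== PORT A =====
-- izbrojSveKockice: loop appending kockice.count(i) for i in range(1,7)
def izbrojSveKockice (kockice : List Int) : List Int :=
  (PySem.List.pyRange 1 7 1).foldl (fun izbrojeno i => izbrojeno ++ [(PySem.List.count kockice i : Int)]) ([] : List Int)

-- the 'for i in range(6)' loop with early return, reading izbrojeno[0..5] in order
def kentaLoop (bacanje : Int) : List Int → Int → Int
  | [], _ => 0
  | x :: rest, brojac =>
    if x = 1 then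
      if brojac + 1 = 5 then 76 - 10 * bacanje
      else kentaLoop bacanje rest (brojac + 1)
    else kentaLoop bacanje rest 0

def kenta (kockice : List Int) (bacanje : Int) : Int :=
  kentaLoop bacanje (izbrojSveKockice kockice) 0

-- ===== PORT B =====
def kenta_alt (kockice : List Int) (bacanje : Int) : Int :=
  let singles : PySem.Set Int :=
    PySem.Set.ofList ((PySem.List.pyRange 1 7 1).filter (fun f => PySem.List.count kockice f == 1))
  if PySem.Set.issubset (PySem.Set.ofList [1, 2, 3, 4, 5]) singles
     || PySem.Set.issubset (PySem.Set.ofList [2, 3, 4, 5, 6]) singles then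
    76 - 10 * bacanje
  else 0

-- ===== PRECONDITION & SPEC =====
def Spec_kenta (kockice : List Int) (bacanje : Int) (out : Int) : Prop := out = kenta_alt kockice bacanje
instance (kockice : List Int) (bacanje : Int) (out : Int) : Decidable (Spec_kenta kockice bacanje out) := by unfold Spec_kenta; infer_instance

-- ===== CLAIM (what is proved, stated in full; the proofs are below) =====
def Claim_equal_kenta : Prop := ∀ (kockice : List Int) (bacanje : Int), Dom_kenta kockice bacanje → Spec_kenta kockice bacanje (kenta kockice bacanje)

-- ===== LEMMAS AND PROOFS =====
theorem pyRange_one_seven : PySem.List.pyRange 1 7 1 = [1, 2, 3, 4, 5, 6] := by decide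

theorem izbroj_eq (kockice : List Int) :
    izbrojSveKockice kockice =
      [(PySem.List.count kockice 1 : Int), (PySem.List.count kockice 2 : Int),
       (PySem.List.count kockice 3 : Int), (PySem.List.count kockice 4 : Int),
       (PySem.List.count kockice 5 : Int), (PySem.List.count kockice 6 : Int)] := by
  simp [izbrojSveKockice, pyRange_one_seven, List.foldl]

-- ===== VERDICT (by name: the statement is the Claim_ definition above) =====
set_option maxHeartbeats 2000000 in
theorem kenta_spec : Claim_equal_kenta := by
  intro kockice bacanje _
  show kenta kockice bacanje = kenta_alt kockice bacanje
  unfold kenta kenta_alt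
  rw [izbroj_eq, pyRange_one_seven]
  cases h1 : (PySem.List.count kockice 1 == 1) <;>
  cases h2 : (PySem.List.count kockice 2 == 1) <;>
  cases h3 : (PySem.List.count kockice 3 == 1) <;>
  cases h4 : (PySem.List.count kockice 4 == 1) <;>
  cases h5 : (PySem.List.count kockice 5 == 1) <;>
  cases h6 : (PySem.List.count kockice 6 == 1) <;>
  simp only [PySem.Set.ofList, List.filter, h1, h2, h3, h4, h5, h6] <;>
  simp_all [kentaLoop, Nat.cast_eq_one, beq_iff_eq, PySem.Set.issubset,
    List.foldl, PySem.Set.add, PySem.List.count]
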